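-- pv_equiv track=rewrite | github.com/Lecrut/Diffusion-code-generation | data/code/60_6_4.py | last_item_generator
-- ===== SOURCE A (Python) =====
-- def last_item_generator(iterable):
--     it = iter(iterable)
--     last_item = None
--     try:
--         last_item = next(it)
--     except StopIteration:
--         return
--     for item in it:
--         last_item = item
--         yield last_item
-- ===== SOURCE B (Python) =====
-- def last_item_generator(iterable):
--     items = list(iterable)
--     yield from items[1:]
-- ===== Notes on version B (the rewrite author's own statement) =====
-- stated objective: simpler
-- what changed: Replaced A's lazy prime-with-next()/try-except single pass by a staged implementation that first materializes the iterable into a list and then yields from the slice items[1:], eliminating the loop, the exception handling and the last_item variable entirely.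
import Mathlib
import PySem

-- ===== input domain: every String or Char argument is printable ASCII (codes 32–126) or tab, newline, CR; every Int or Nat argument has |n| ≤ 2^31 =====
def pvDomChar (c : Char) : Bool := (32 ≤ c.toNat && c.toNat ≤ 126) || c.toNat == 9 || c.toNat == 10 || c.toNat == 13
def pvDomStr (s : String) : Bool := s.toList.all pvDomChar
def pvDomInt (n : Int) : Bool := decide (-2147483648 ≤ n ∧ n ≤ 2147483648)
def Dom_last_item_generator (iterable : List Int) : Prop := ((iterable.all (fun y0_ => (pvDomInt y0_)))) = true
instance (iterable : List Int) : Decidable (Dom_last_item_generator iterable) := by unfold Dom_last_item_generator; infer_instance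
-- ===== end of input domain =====

-- B replaces A's lazy next()-priming loop by materializing the iterable and
-- yielding from the slice items[1:] (objective: simpler; B is eager where A is lazy).


-- ===== PORT A =====
-- A: prime the iterator with next() (return on StopIteration), then loop over the
-- rest, setting last_item and yielding it each time.
def last_item_generator (iterable : List Int) : List Int :=
  match iterable with
  | [] => []                       -- next(it) raises StopIteration → return (no items yielded)
  | _firstItem :: it =>            -- last_item = next(it) succeeded
    (it.foldl (fun (acc : List Int × Option Int) item =>
        let lastItem := item       -- last_item = item
        (acc.1 ++ [lastItem], some lastItem))   -- yield last_item
      ([], some _firstItem)).1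

-- ===== PORT B =====
-- B: items = list(iterable); yield from items[1:]
def last_item_generator_alt (iterable : List Int) : List Int :=
  let items := iterable
  PySem.List.slice items (some 1) none

-- ===== PRECONDITION & SPEC =====
def Spec_last_item_generator (iterable : List Int) (out : List Int) : Prop := out = last_item_generator_alt iterable
instance (iterable : List Int) (out : List Int) : Decidable (Spec_last_item_generator iterable out) := by unfold Spec_last_item_generator; infer_instance

-- ===== CLAIM (what is proved, stated in full; the proofs are below) =====
def Claim_equal_last_item_generator : Prop := ∀ (iterable : List Int), Dom_last_item_generator iterable → Spec_last_item_generator iterable (last_item_generator iterable)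

-- ===== LEMMAS AND PROOFS =====

-- A's loop keeps its accumulated yields as a prefix and appends the tail's elements.
theorem pvA_foldl (it : List Int) (pre : List Int) (lo : Option Int) :
    (it.foldl (fun (acc : List Int × Option Int) item =>
        let lastItem := item
        (acc.1 ++ [lastItem], some lastItem)) (pre, lo)).1 = pre ++ it := by
  induction it generalizing pre lo with
  | nil => simp
  | cons x xs ih => simp [List.foldl, ih]

-- ===== VERDICT (by name: the statement is the Claim_ definition above) =====
theorem last_item_generator_spec : Claim_equal_last_item_generator := by
  intro iterable _
  unfold Spec_last_item_generator last_item_generator last_item_generator_alt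
  cases iterable with
  | nil => simp [PySem.List.slice_from_one]
  | cons x xs =>
    show (xs.foldl _ ([], some x)).1 = _
    rw [pvA_foldl]
    simp [PySem.List.slice_from_one]
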